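-- pv_equiv track=rewrite | github.com/VishalDeoPrasad/InterviewBit | Noble Integer.py | solve
-- ===== SOURCE A (Python) =====
-- def solve(A):
--     unique = set(A)
--     for num in unique:
--         cnt = 0
--         for a in A:
--             if a > num:
--                 cnt += 1
--         if cnt == num:
--             return 1
--     return -1
-- ===== SOURCE B (Python) =====
-- def solve(A):
--     s = sorted(A)
--     n = len(s)
--     for i in range(n):
--         if i == n - 1 or s[i] != s[i + 1]:
--             # s[i] is the last occurrence of its value; n-1-i elements are greater
--             if s[i] == n - 1 - i:
--                 return 1
--     return -1
-- ===== Notes on version B (the rewrite author's own statement) =====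
-- stated objective: faster
-- what changed: Instead of counting greater elements by a full inner scan for every distinct value, B sorts the array once and reads the greater-count of each value's last occurrence directly as the suffix length n-1-i.
import Mathlib
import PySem

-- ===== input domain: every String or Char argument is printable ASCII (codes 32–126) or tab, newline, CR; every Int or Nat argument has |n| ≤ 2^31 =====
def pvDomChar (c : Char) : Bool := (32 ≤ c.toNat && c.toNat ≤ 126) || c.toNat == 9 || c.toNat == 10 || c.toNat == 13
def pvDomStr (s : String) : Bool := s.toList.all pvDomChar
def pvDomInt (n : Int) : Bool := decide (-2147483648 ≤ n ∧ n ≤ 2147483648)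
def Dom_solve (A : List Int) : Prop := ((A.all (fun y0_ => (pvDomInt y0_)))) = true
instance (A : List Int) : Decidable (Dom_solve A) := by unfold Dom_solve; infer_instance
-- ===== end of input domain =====

-- B sorts once and reads each value's greater-count as a suffix length, replacing A's per-value full scan (asymptotically faster; timing measured by the check).


-- ===== PORT A =====
def solveCnt (A : List Int) (num : Int) : Int :=
  A.foldl (fun c a => if a > num then c + 1 else c) 0

def solveLoop (A : List Int) : List Int → Int
  | [] => -1
  | num :: rest => if solveCnt A num = num then 1 else solveLoop A rest

def solve (A : List Int) : Int := solveLoop A (PySem.Set.ofList A)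

-- ===== PORT B =====
def solveAltLoop : List Int → Int
  | [] => -1
  | [x] => if x = 0 then 1 else -1
  | x :: y :: r =>
      if x ≠ y then
        (if x = ((y :: r).length : Int) then 1 else solveAltLoop (y :: r))
      else solveAltLoop (y :: r)

def solve_alt (A : List Int) : Int :=
  solveAltLoop (PySem.List.sorted A (fun x => x) false)

-- ===== PRECONDITION & SPEC =====
def Spec_solve (A : List Int) (out : Int) : Prop := out = solve_alt A
instance (A : List Int) (out : Int) : Decidable (Spec_solve A out) := by unfold Spec_solve; infer_instance

-- ===== CLAIM (what is proved, stated in full; the proofs are below) =====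
def Claim_equal_solve : Prop := ∀ (A : List Int), Dom_solve A → Spec_solve A (solve A)

-- ===== LEMMAS AND PROOFS =====

-- the "noble" test over a list, as a Bool
def nobleAny (xs : List Int) : Bool :=
  xs.any fun v => ((xs.countP (fun a => decide (v < a)) : Int) == v)

theorem solveCnt_foldl (num : Int) (A : List Int) (c : Int) :
    A.foldl (fun c a => if a > num then c + 1 else c) c
      = c + (A.countP (fun a => decide (num < a)) : Int) := by
  induction A generalizing c with
  | nil => simp
  | cons a t ih =>
    simp only [List.foldl_cons, List.countP_cons, ih]
    by_cases h : num < a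
    · simp [h, gt_iff_lt]; push_cast; ring
    · simp [h, gt_iff_lt]
  
theorem solveCnt_eq (A : List Int) (num : Int) :
    solveCnt A num = (A.countP (fun a => decide (num < a)) : Int) := by
  simpa using solveCnt_foldl num A 0

theorem solveLoop_eq (A : List Int) (l : List Int) :
    solveLoop A l = if l.any (fun num => solveCnt A num == num) then 1 else -1 := by
  induction l with
  | nil => simp [solveLoop]
  | cons n rest ih =>
    by_cases h : solveCnt A n = n <;> simp [solveLoop, h, ih]

-- dropping a minimal head that cannot itself be the (unique-in-the-tail) witness
theorem nobleAny_cons (x : Int) (t : List Int) (hxall : ∀ b ∈ t, x ≤ b)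
    (hx : (((x :: t).countP (fun a => decide (x < a)) : Int) = x) →
            ∃ v ∈ t, ((t.countP (fun a => decide (v < a)) : Int) = v)) :
    nobleAny (x :: t) = nobleAny t := by
  have hcount : ∀ v ∈ t,
      ((x :: t).countP (fun a => decide (v < a)) : Int)
        = (t.countP (fun a => decide (v < a)) : Int) := by
    intro v hv
    have : ¬ v < x := not_lt.2 (hxall v hv)
    simp [List.countP_cons, this]
  apply Bool.eq_iff_iff.mpr
  simp only [nobleAny, List.any_eq_true, beq_iff_eq]
  constructor
  · rintro ⟨v, hv, he⟩
    rcases List.mem_cons.1 hv with rfl | hv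
    · exact hx he
    · exact ⟨v, hv, by rw [← hcount v hv]; exact he⟩
  · rintro ⟨v, hv, he⟩
    exact ⟨v, List.mem_cons_of_mem _ hv, by rw [hcount v hv]; exact he⟩

theorem solveAltLoop_eq (s : List Int) (hs : s.Pairwise (· ≤ ·)) :
    solveAltLoop s = if nobleAny s then 1 else -1 := by
  induction s with
  | nil => simp [solveAltLoop, nobleAny]
  | cons x t ih =>
    cases t with
    | nil =>
      by_cases h : x = 0 <;> simp [solveAltLoop, nobleAny, h] <;> omega
    | cons y r =>
      have hxall : ∀ b ∈ y :: r, x ≤ b := (List.pairwise_cons.1 hs).1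
      have ht : (y :: r).Pairwise (· ≤ ·) := (List.pairwise_cons.1 hs).2
      have hxy : x ≤ y := hxall y (by simp)
      by_cases hne : x = y
      · -- duplicate head: B skips it; its count equals that of its later copy y
        subst hne
        have heq : solveAltLoop (x :: x :: r) = solveAltLoop (x :: r) := by
          show (if x ≠ x then (if x = (((x :: r).length : Int)) then 1 else solveAltLoop (x :: r))
                else solveAltLoop (x :: r)) = solveAltLoop (x :: r)
          rw [if_neg (by simp)]
        rw [heq, ih ht, nobleAny_cons x (x :: r) hxall]
        intro he
        refine ⟨x, by simp, ?_⟩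
        have hcc : ((x :: x :: r).countP (fun a => decide (x < a)) : Int)
            = ((x :: r).countP (fun a => decide (x < a)) : Int) := by
          simp [List.countP_cons]
        rw [← hcc]; exact he
      · -- last occurrence of x: every later element is strictly greater
        have hgt : ∀ a ∈ y :: r, x < a := by
          intro a ha
          rcases List.mem_cons.1 ha with rfl | ha
          · exact lt_of_le_of_ne hxy hne
          · exact lt_of_lt_of_le (lt_of_le_of_ne hxy hne) ((List.pairwise_cons.1 ht).1 a ha)
        have hcx : ((x :: y :: r).countP (fun a => decide (x < a)) : Int)
            = ((y :: r).length : Int) := by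
          have h0 : (y :: r).countP (fun a => decide (x < a)) = (y :: r).length := by
            rw [List.countP_eq_length]
            intro a ha; simpa using hgt a ha
          simp [List.countP_cons, h0]
        by_cases hlen : x = ((y :: r).length : Int)
        · -- x is noble: B returns 1 and the condition holds with witness x
          have h1 : solveAltLoop (x :: y :: r) = 1 := by
            show (if x ≠ y then (if x = (((y :: r).length : Int)) then 1 else solveAltLoop (y :: r))
                  else solveAltLoop (y :: r)) = 1
            rw [if_pos hne, if_pos hlen]
          rw [h1, if_pos]
          simp only [nobleAny, List.any_eq_true, beq_iff_eq]
          exact ⟨x, by simp, by rw [hcx]; exact hlen.symm⟩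
        · have h2 : solveAltLoop (x :: y :: r) = solveAltLoop (y :: r) := by
            show (if x ≠ y then (if x = (((y :: r).length : Int)) then 1 else solveAltLoop (y :: r))
                  else solveAltLoop (y :: r)) = solveAltLoop (y :: r)
            rw [if_pos hne, if_neg hlen]
          rw [h2, ih ht, nobleAny_cons x (y :: r) hxall]
          intro he
          exact absurd (hcx ▸ he).symm hlen

-- ===== VERDICT (by name: the statement is the Claim_ definition above) =====
theorem solve_spec : Claim_equal_solve := by
  intro A _
  show solve A = solve_alt A
  have hperm : (PySem.List.sorted A (fun x => x) false).Perm A := PySem.List.sorted_perm A _ _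
  have hpw : (PySem.List.sorted A (fun x => x) false).Pairwise (· ≤ ·) := by
    simpa using PySem.List.sorted_pairwise A (fun x => x)
  rw [solve, solveLoop_eq, solve_alt, solveAltLoop_eq _ hpw]
  have hcond : (List.any (PySem.Set.ofList A) fun num => solveCnt A num == num)
      = nobleAny (PySem.List.sorted A (fun x => x) false) := by
    apply Bool.eq_iff_iff.mpr
    simp only [nobleAny, List.any_eq_true, beq_iff_eq, PySem.Set.mem_ofList, solveCnt_eq,
      hperm.mem_iff, hperm.countP_eq]
  rw [hcond]
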